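-- pv_equiv track=rewrite | github.com/TRkizaki/cryptoverse2023 | crypto_lfsr_explorer/py.py | recover_all
-- ===== SOURCE A (Python) =====
-- def recover_all(output):
--     all_recs=[]
--     for val in output:
--         reced = [val]
--         for i in range(8):
--             val = val >> 1
--             reced.append(val)
--         reced.reverse()
--         all_recs.append(reced)
--     all_bs = []
--     for reced in all_recs:
--         bb =[]
--         for x in range(0,len(reced)-1):
--             if (reced[x]<<1)^0 == reced[x+1]:
--                 bb.append(0)
--             else:
--                 bb.append(1)
--         all_bs.append(bb)
--     return all_recs,all_bs
-- ===== SOURCE B (Python) =====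
-- def recover_all(output):
--     # Simpler: bits come straight from masking val's low byte (MSB first);
--     # val >> i floor-shifts, so this matches the neighbour-comparison for all ints.
--     all_recs = [[val >> i for i in range(8, -1, -1)] for val in output]
--     all_bs = [[(val >> i) & 1 for i in range(7, -1, -1)] for val in output]
--     return all_recs, all_bs
-- ===== Notes on version B (the rewrite author's own statement) =====
-- stated objective: simpler
-- what changed: B derives each bit list directly by masking bit i of val ((val >> i) & 1, MSB-first) in a single pair of comprehensions, instead of A's second pass that compares consecutive entries of the shift list via (reced[x]<<1)^0 == reced[x+1].
import Mathlib
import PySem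

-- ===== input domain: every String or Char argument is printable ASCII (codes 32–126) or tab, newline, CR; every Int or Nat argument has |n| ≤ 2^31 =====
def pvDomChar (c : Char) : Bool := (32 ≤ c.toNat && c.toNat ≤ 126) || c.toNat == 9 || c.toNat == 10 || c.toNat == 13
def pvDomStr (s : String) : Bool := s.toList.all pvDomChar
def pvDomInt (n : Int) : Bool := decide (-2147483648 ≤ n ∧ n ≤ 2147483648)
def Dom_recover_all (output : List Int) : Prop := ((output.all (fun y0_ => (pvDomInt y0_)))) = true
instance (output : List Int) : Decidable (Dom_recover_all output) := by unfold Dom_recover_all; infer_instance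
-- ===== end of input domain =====

-- B replaces A's neighbour-comparison pass over the shift lists by direct bit masking of each
-- value (objective: simpler; one comprehension per result, no second pass over all_recs).

-- ===== PORT A =====
def recover_all (output : List Int) : List (List Int) × List (List Int) :=
  let all_recs := output.foldl (fun all_recs val =>
    -- reced = [val]; for i in range(8): val = val >> 1; reced.append(val)
    let st := (List.range 8).foldl (fun (st : Int × List Int) _ =>
        let val := st.1 >>> (1 : Nat)
        (val, st.2 ++ [val])) (val, [val])
    all_recs ++ [st.2.reverse]) []
  let all_bs := all_recs.foldl (fun all_bs reced =>
    let bb := (PySem.List.pyRange 0 ((reced.length : Int) - 1) 1).foldl (fun bb x =>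
        if PySem.Int.bxor (PySem.List.pyGetD reced x (0:Int) <<< (1 : Nat)) 0
             = PySem.List.pyGetD reced (x + 1) (0:Int)
        then bb ++ [(0 : Int)] else bb ++ [(1 : Int)]) []
    all_bs ++ [bb]) []
  (all_recs, all_bs)

-- ===== PORT B =====
-- i.toNat is exact here: range(8,-1,-1)/range(7,-1,-1) yield only nonnegative i.
def recover_all_alt (output : List Int) : List (List Int) × List (List Int) :=
  (output.map (fun val => (PySem.List.pyRange 8 (-1) (-1)).map (fun i => val >>> i.toNat)),
   output.map (fun val => (PySem.List.pyRange 7 (-1) (-1)).map (fun i =>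
      PySem.Int.band (val >>> i.toNat) 1)))

-- ===== PRECONDITION & SPEC =====
def Spec_recover_all (output : List Int) (out : List (List Int) × List (List Int)) : Prop := out = recover_all_alt output
instance (output : List Int) (out : List (List Int) × List (List Int)) : Decidable (Spec_recover_all output out) := by unfold Spec_recover_all; infer_instance

-- ===== CLAIM (what is proved, stated in full; the proofs are below) =====
def Claim_equal_recover_all : Prop := ∀ (output : List Int), Dom_recover_all output → Spec_recover_all output (recover_all output)

-- ===== LEMMAS AND PROOFS =====

-- foldl that only appends singletons is a map
theorem foldl_push {α β : Type} (f : α → β) (l : List α) (acc : List β) :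
    l.foldl (fun a v => a ++ [f v]) acc = acc ++ l.map f := by
  induction l generalizing acc with
  | nil => simp
  | cons x xs ih => simp [List.foldl_cons, ih]

-- a foldl that appends one flag per element is a map
theorem foldl_pushif {α : Type} (c : α → Prop) [DecidablePred c] (u v : Int) (l : List α) (acc : List Int) :
    l.foldl (fun a x => if c x then a ++ [u] else a ++ [v]) acc
      = acc ++ l.map (fun x => if c x then u else v) := by
  induction l generalizing acc with
  | nil => simp
  | cons x xs ih => by_cases h : c x <;> simp [List.foldl_cons, h, ih]

-- shift composition: (n >> k) >> 1 = n >> (k+1)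
theorem sr (n : Int) (k : Nat) : (n >>> k) >>> (1 : Nat) = n >>> (k + 1) := by
  rw [Int.shiftRight_eq_div_pow, Int.shiftRight_eq_div_pow, Int.shiftRight_eq_div_pow]
  push_cast
  rw [pow_succ, ← Int.ediv_ediv_of_nonneg]
  positivity

-- the neighbour comparison computes the low bit
theorem bitlem (m : Int) :
    (if (m >>> (1 : Nat)) <<< (1 : Nat) = m then (0 : Int) else 1)
      = PySem.Int.band m 1 := by
  rw [PySem.Int.band_one]
  have h1 : (m >>> (1 : Nat)) = m / 2 := by
    simpa using Int.shiftRight_eq_div_pow m 1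
  have h2 : ∀ a : Int, a <<< (1 : Nat) = a * 2 := by
    intro a; simpa using Int.shiftLeft_eq a 1
  rw [PySem.Int.mod_eq_emod_of_pos (by omega)]
  simp only [h1, h2]
  split_ifs with h <;> omega

-- ===== VERDICT (by name: the statement is the Claim_ definition above) =====
theorem recover_all_spec : Claim_equal_recover_all := by
  intro output _
  unfold Spec_recover_all recover_all recover_all_alt
  simp only [foldl_push, List.nil_append, List.map_map]
  rw [Prod.mk.injEq]
  refine ⟨?_, ?_⟩
  · apply List.map_congr_left
    intro val _
    have hr : PySem.List.pyRange 8 (-1) (-1) = [8, 7, 6, 5, 4, 3, 2, 1, 0] := by decide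
    simp only [hr, List.map, List.range_succ, List.foldl_append, List.foldl_cons,
      List.foldl_nil, List.reverse_append, List.reverse_cons, List.reverse_nil]
    norm_num [sr]
    and_intros <;> rfl
  · apply List.map_congr_left
    intro val _
    have hr : PySem.List.pyRange 7 (-1) (-1) = [7, 6, 5, 4, 3, 2, 1, 0] := by decide
    simp only [Function.comp, List.range_succ, List.foldl_append, List.foldl_cons,
      List.foldl_nil, List.reverse_append, List.reverse_cons, List.reverse_nil]
    have hr2 : PySem.List.pyRange 0 8 = [0, 1, 2, 3, 4, 5, 6, 7] := by decide
    have ht : ∀ n : Nat, Int.toNat (OfNat.ofNat n) = OfNat.ofNat n := fun n => rfl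
    rw [foldl_pushif]
    norm_num
    simp only [hr2, List.map_cons, List.map_nil]
    norm_num [PySem.List.pyGetD, PySem.List.pyGet?, PySem.List.pyIdx?, ht]
    simp only [bitlem]
    simp [sr, hr, ht]
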